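-- pv_equiv track=rewrite | github.com/IvanPdrk/Crypto | Aexp.py | Aexp
-- ===== SOURCE A (Python) =====
-- def Aexp(x,b,n):
-- 	z=1
-- 	Az=[]
-- 	for i in range(len(b)):
-- 		if(b[i]=='0'):
-- 			z=((z*z)%n)
--
-- 		if(b[i]=='1'):
-- 			z=(((z*z)*x)%n)
-- 		Az.append(z)
-- 	return(Az)
-- ===== SOURCE B (Python) =====
-- def Aexp(x, b, n):
--     # Alternative: track the binary value e of the prefix of binary digits seen
--     # so far and compute each output directly as pow(x, e, n), instead of the
--     # incremental square-and-multiply accumulator.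
--     out = []
--     e = 0
--     z = 1
--     for c in b:
--         if c in '01':
--             e = 2 * e + (c == '1')
--             z = pow(x, e, n)
--         out.append(z)
--     return out
-- ===== Notes on version B (the rewrite author's own statement) =====
-- stated objective: alternative
-- what changed: B replaces A's incremental square-and-multiply accumulator by tracking the integer value e of the binary prefix and computing each appended element directly as pow(x, e, n).
import Mathlib
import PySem

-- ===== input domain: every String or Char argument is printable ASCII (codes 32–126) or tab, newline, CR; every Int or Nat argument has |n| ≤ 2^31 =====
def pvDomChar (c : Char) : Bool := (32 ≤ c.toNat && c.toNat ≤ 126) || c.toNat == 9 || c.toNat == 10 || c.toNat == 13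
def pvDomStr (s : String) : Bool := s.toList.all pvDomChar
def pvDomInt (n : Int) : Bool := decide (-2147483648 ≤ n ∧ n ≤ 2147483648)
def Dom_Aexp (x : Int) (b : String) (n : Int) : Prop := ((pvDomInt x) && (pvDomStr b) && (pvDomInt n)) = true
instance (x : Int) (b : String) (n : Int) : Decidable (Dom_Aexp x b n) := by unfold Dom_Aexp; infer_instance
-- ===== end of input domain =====

-- B tracks the binary value of the prefix of binary digits and computes each
-- element directly as pow(x, e, n), instead of A's square-and-multiply accumulator.

-- ===== PORT A =====
-- A's loop: z=1; for each char, square (and multiply by x on '1') mod n, append z.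
def AexpLoopA (x n : Int) : List Char → Int → List Int → List Int
  | [], _, acc => acc
  | c :: cs, z, acc =>
    let z1 := if c = '0' then PySem.Int.mod (z * z) n else z
    let z2 := if c = '1' then PySem.Int.mod (z1 * z1 * x) n else z1
    AexpLoopA x n cs z2 (acc ++ [z2])

def Aexp (x : Int) (b : String) (n : Int) : List Int :=
  AexpLoopA x n b.toList 1 []

-- ===== PORT B =====
-- B's loop: e = value of the binary-digit prefix so far; on a binary digit set
-- z = pow(x, e, n) (PySem.Int.powMod); append z.
def AexpLoopB (x n : Int) : List Char → Nat → Int → List Int → List Int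
  | [], _, _, acc => acc
  | c :: cs, e, z, acc =>
    if c = '0' ∨ c = '1' then
      let e' := 2 * e + (if c = '1' then 1 else 0)
      let z' := PySem.Int.powMod x e' n
      AexpLoopB x n cs e' z' (acc ++ [z'])
    else
      AexpLoopB x n cs e z (acc ++ [z])

def Aexp_alt (x : Int) (b : String) (n : Int) : List Int :=
  AexpLoopB x n b.toList 0 1 []

-- ===== PRECONDITION & SPEC =====
-- Pre_ excludes exactly the inputs where Python A raises ZeroDivisionError:
-- n = 0 together with at least one binary digit in b (B raises there too).
def Pre_Aexp (x : Int) (b : String) (n : Int) : Prop :=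
  n ≠ 0 ∨ ∀ c ∈ b.toList, ¬(c = '0' ∨ c = '1')
instance (x : Int) (b : String) (n : Int) : Decidable (Pre_Aexp x b n) := by
  unfold Pre_Aexp; infer_instance

def pvWitness_Aexp : Int × String × Int := (7, "1011", 13)

def Spec_Aexp (x : Int) (b : String) (n : Int) (out : List Int) : Prop := out = Aexp_alt x b n
instance (x : Int) (b : String) (n : Int) (out : List Int) : Decidable (Spec_Aexp x b n out) := by unfold Spec_Aexp; infer_instance

-- ===== CLAIM (what is proved, stated in full; the proofs are below) =====
def Claim_equal_Aexp : Prop := ∀ (x : Int) (b : String) (n : Int), Dom_Aexp x b n → Pre_Aexp x b n → Spec_Aexp x b n (Aexp x b n)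

-- ===== LEMMAS AND PROOFS =====

-- On a '0' step: squaring A's residue equals the fresh power at doubled exponent.
lemma sq_fmod (x n : Int) (e : Nat) :
    ((x ^ e).fmod n * (x ^ e).fmod n).fmod n = (x ^ (2 * e)).fmod n := by
  rw [two_mul, pow_add]; exact (Int.mul_fmod _ _ _).symm

-- On a '1' step: squaring-and-multiplying A's residue equals the fresh power.
lemma sqmul_fmod (x n : Int) (e : Nat) :
    ((x ^ e).fmod n * (x ^ e).fmod n * x).fmod n = (x ^ (2 * e + 1)).fmod n := by
  rw [pow_add, pow_one, two_mul, pow_add]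
  calc ((x ^ e).fmod n * (x ^ e).fmod n * x).fmod n
      = (((x ^ e).fmod n * (x ^ e).fmod n).fmod n * x.fmod n).fmod n := Int.mul_fmod _ _ _
    _ = ((x ^ e * x ^ e).fmod n * x.fmod n).fmod n := by
        rw [(Int.mul_fmod (x ^ e) (x ^ e) n).symm]
    _ = (x ^ e * x ^ e * x).fmod n := (Int.mul_fmod _ _ _).symm

-- Invariant: A's accumulator z is 1 with no binary digit seen yet, or x^e mod n.
lemma loop_eq (x n : Int) :
    ∀ (cs : List Char) (e : Nat) (z : Int) (acc : List Int),
      (z = 1 ∧ e = 0) ∨ z = PySem.Int.mod (x ^ e) n →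
      AexpLoopA x n cs z acc = AexpLoopB x n cs e z acc := by
  intro cs
  induction cs with
  | nil => intro e z acc _; rfl
  | cons c cs ih =>
    intro e z acc hz
    by_cases h0 : c = '0'
    · subst h0
      simp only [AexpLoopA, AexpLoopB,
        if_neg (show ¬('0' : Char) = '1' by decide), if_true, true_or]
      have hnew : PySem.Int.mod (z * z) n = PySem.Int.powMod x (2 * e + 0) n := by
        rw [PySem.Int.powMod_eq]
        rcases hz with ⟨h1, h2⟩ | h1
        · simp [h1, h2, PySem.Int.mod]
        · simp only [h1, PySem.Int.mod, Nat.add_zero]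
          exact sq_fmod x n e
      rw [hnew, ih (2 * e + 0) _ _ (Or.inr (PySem.Int.powMod_eq x _ n))]
    · by_cases h1 : c = '1'
      · subst h1
        simp only [AexpLoopA, AexpLoopB, if_neg (show ¬('1' : Char) = '0' by decide),
          if_true, or_true]
        have hnew : PySem.Int.mod (z * z * x) n = PySem.Int.powMod x (2 * e + 1) n := by
          rw [PySem.Int.powMod_eq]
          rcases hz with ⟨hh1, hh2⟩ | hh1
          · simp only [hh1, hh2, PySem.Int.mod, Nat.mul_zero, Nat.zero_add, pow_one, one_mul]
          · simp only [hh1, PySem.Int.mod]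
            exact sqmul_fmod x n e
        rw [hnew, ih (2 * e + 1) _ _ (Or.inr (PySem.Int.powMod_eq x _ n))]
      · simp only [AexpLoopA, AexpLoopB, if_neg h0, if_neg h1, if_neg (not_or.mpr ⟨h0, h1⟩)]
        exact ih e z _ hz

-- ===== VERDICT (by name: the statement is the Claim_ definition above) =====
theorem Aexp_spec : Claim_equal_Aexp := by
  intro x b n _ hpre
  unfold Spec_Aexp Aexp Aexp_alt
  rcases hpre with hn | hnb
  · exact loop_eq x n b.toList 0 1 [] (Or.inl ⟨rfl, rfl⟩)
  · -- no binary digit in b: both loops just repeat z = 1; generalize and induct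
    have : ∀ (cs : List Char), (∀ c ∈ cs, ¬(c = '0' ∨ c = '1')) →
        ∀ (e : Nat) (z : Int) (acc : List Int),
        AexpLoopA x n cs z acc = AexpLoopB x n cs e z acc := by
      intro cs
      induction cs with
      | nil => intro _ e z acc; rfl
      | cons c cs ih =>
        intro h e z acc
        have hc := h c (List.mem_cons_self ..)
        rw [not_or] at hc
        simp only [AexpLoopA, AexpLoopB, if_neg hc.1, if_neg hc.2,
          if_neg (not_or.mpr ⟨hc.1, hc.2⟩)]
        exact ih (fun d hd => h d (List.mem_cons_of_mem _ hd)) e z _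
    exact this b.toList hnb 0 1 []
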